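-- pv_equiv track=rewrite | github.com/Anshler/Wildcard_sth_idk | app/search_engine.py | split_key
-- ===== SOURCE A (Python) =====
-- def split_key(b):  # split từ khóa theo chữ cái và ký tự wildcard
--     b_list = []
--     b=str(b)
--     c = ""  # biến tạm thời để gán giá trị
--     for i in range(len(b)):
--         c = c + b[i]  # mỗi vòng lặp sẽ gán ký tự hiện tại vào chuỗi này
--         if i == len(b) - 1:
--             b_list.append(c)
--             c = ""
--         else:
--             if ((b[i] == "?" or b[i] == "*") and (b[i + 1] != "?" and b[i + 1] != "*")) or (((b[i] != "?" and b[i] != "*") and (b[i + 1] == "?" or b[i + 1] == "*"))):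
--                 b_list.append(c)  # đoạn trên, nếu đến cuối hàng, hoặc kí tự sau khác thể loại kí tự hiện tại (ký tự khác so với ?*)
--                 c = ""  # thì mình append vào list, clear c đi cho vòng lặp mới
--     return b_list
-- ===== SOURCE B (Python) =====
-- def split_key(b):
--     # Build runs back-to-front: walk the string in reverse, merging each char
--     # into the first run when it has the same wildcard class, else starting a new run.
--     b = str(b)
--     out = []
--     for ch in reversed(b):
--         if out and ((ch in "?*") == (out[0][0] in "?*")):
--             out[0] = ch + out[0]
--         else:
--             out.insert(0, ch)
--     return out
-- ===== Notes on version B (the rewrite author's own statement) =====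
-- stated objective: idiomatic
-- what changed: Replaces the indexed loop with lookahead (b[i] vs b[i+1]) and an explicit run buffer by a reverse walk that merges each character into the head run when its wildcard class matches, so no index, lookahead or separate accumulator string is kept.
import Mathlib
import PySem

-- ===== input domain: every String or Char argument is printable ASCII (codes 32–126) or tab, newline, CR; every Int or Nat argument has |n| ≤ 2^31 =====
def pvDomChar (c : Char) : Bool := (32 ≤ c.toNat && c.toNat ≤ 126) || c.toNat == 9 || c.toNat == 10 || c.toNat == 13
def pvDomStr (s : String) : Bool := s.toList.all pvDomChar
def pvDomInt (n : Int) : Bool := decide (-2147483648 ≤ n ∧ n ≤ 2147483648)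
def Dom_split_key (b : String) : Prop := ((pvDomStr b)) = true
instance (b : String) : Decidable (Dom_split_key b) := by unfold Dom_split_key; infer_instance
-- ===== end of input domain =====

-- B replaces A's indexed lookahead scan by a reverse walk merging into the head run; objective: idiomatic.

-- ===== PORT A =====
-- wildcard test: b[i] == "?" or b[i] == "*"
def pvWild (c : Char) : Bool := c == '?' || c == '*'

-- the body of A's `for i in range(len(b))` loop; state = (b_list, c), strings as List Char
def split_keyBody (bl : List Char) (st : List (List Char) × List Char) (i : Nat) :
    List (List Char) × List Char :=
  let c := st.2 ++ [bl[i]!]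
  if i == bl.length - 1 then (st.1 ++ [c], [])
  else if (pvWild bl[i]! && !pvWild bl[i+1]!) || (!pvWild bl[i]! && pvWild bl[i+1]!) then
    (st.1 ++ [c], [])
  else (st.1, c)

def split_key (b : String) : List String :=
  (((List.range b.toList.length).foldl (split_keyBody b.toList) ([], [])).1).map
    fun cs => String.mk cs

-- ===== PORT B =====
-- B's loop `for ch in reversed(b)` merging into the head run = foldr over the char list
def pvRuns (l : List Char) : List (List Char) :=
  l.foldr (fun ch out =>
    match out with
    | (d :: r) :: rs =>
        if pvWild ch == pvWild d then (ch :: d :: r) :: rs else [ch] :: (d :: r) :: rs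
    | _ => [ch] :: out) []

def split_key_alt (b : String) : List String :=
  (pvRuns b.toList).map fun cs => String.mk cs

-- ===== PRECONDITION & SPEC =====
def Spec_split_key (b : String) (out : List String) : Prop := out = split_key_alt b
instance (b : String) (out : List String) : Decidable (Spec_split_key b out) := by unfold Spec_split_key; infer_instance

-- ===== CLAIM (what is proved, stated in full; the proofs are below) =====
def Claim_equal_split_key : Prop := ∀ (b : String), Dom_split_key b → Spec_split_key b (split_key b)

-- ===== LEMMAS AND PROOFS =====

-- A's loop as structural recursion on the char list (proof-side model)
def pvGoA : List Char → List Char → List (List Char)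
  | _, [] => []
  | acc, [c] => [acc ++ [c]]
  | acc, c :: d :: rest =>
      if (pvWild c && !pvWild d) || (!pvWild c && pvWild d) then
        (acc ++ [c]) :: pvGoA [] (d :: rest)
      else pvGoA (acc ++ [c]) (d :: rest)

lemma pvGoA_eq_foldl : ∀ (bl : List Char) (done : List (List Char)) (acc : List Char),
    (List.range bl.length).foldl (split_keyBody bl) (done, acc)
      = (done ++ pvGoA acc bl, if bl.isEmpty then acc else []) := by
  intro bl
  induction bl with
  | nil => intro done acc; simp [pvGoA]
  | cons c rest ih =>
    intro done acc
    have hshift : ∀ st j, j ∈ List.range rest.length →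
        split_keyBody (c :: rest) st (j + 1) = split_keyBody rest st j := by
      intro st j hj
      simp only [List.mem_range] at hj
      simp only [split_keyBody, List.getElem!_cons_succ, List.length_cons]
      have h1 : (j + 1 == rest.length + 1 - 1) = (j == rest.length - 1) := by
        rw [Bool.eq_iff_iff]
        simp only [Nat.add_sub_cancel, beq_iff_eq]
        omega
      rw [h1]
    rw [show (c :: rest).length = rest.length + 1 from rfl,
        List.range_succ_eq_map, List.foldl_cons, List.foldl_map]
    have hc := PySem.List.foldl_congr_mem (l := List.range rest.length)
      (init := split_keyBody (c :: rest) (done, acc) 0)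
      (f := fun st j => split_keyBody (c :: rest) st (j + 1))
      (g := split_keyBody rest) (fun st j hj => hshift st j hj)
    rw [hc]
    cases rest with
    | nil =>
      simp [split_keyBody, pvGoA]
    | cons d rest' =>
      have hlen : (0 == (c :: d :: rest').length - 1) = false := by
        simp [List.length_cons]
      have hB : split_keyBody (c :: d :: rest') (done, acc) 0
          = if (pvWild c && !pvWild d) || (!pvWild c && pvWild d) then
              (done ++ [acc ++ [c]], ([] : List Char))
            else (done, acc ++ [c]) := by
        simp only [split_keyBody, hlen, if_false, Bool.false_eq_true]
        simp
      rw [hB]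
      by_cases hw : ((pvWild c && !pvWild d) || (!pvWild c && pvWild d)) = true
      · rw [if_pos hw, ih]
        simp [pvGoA, hw]
      · rw [if_neg hw, ih]
        have hw' : ((pvWild c && !pvWild d) || (!pvWild c && pvWild d)) = false := by
          revert hw; cases pvWild c <;> cases pvWild d <;> simp
        simp [pvGoA, hw']

-- every nonempty input yields runs whose first run starts with the first char
lemma pvRuns_shape : ∀ (c : Char) (l : List Char),
    ∃ r rs, pvRuns (c :: l) = (c :: r) :: rs := by
  intro c l
  induction l generalizing c with
  | nil => exact ⟨[], [], rfl⟩
  | cons d l' ih =>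
    obtain ⟨r, rs, hr⟩ := ih d
    show ∃ r' rs', (List.foldr _ [] (c :: d :: l')) = _
    rw [List.foldr_cons]
    have : List.foldr _ [] (d :: l') = pvRuns (d :: l') := rfl
    rw [this, hr]
    by_cases hw : (pvWild c == pvWild d) = true
    · exact ⟨d :: r, rs, by simp [hw]⟩
    · exact ⟨[], (d :: r) :: rs, by simp [hw]⟩

lemma pvGoA_eq_runs : ∀ (l : List Char) (acc : List Char),
    pvGoA acc l = match pvRuns l with
      | [] => []
      | r :: rs => (acc ++ r) :: rs := by
  intro l
  induction l with
  | nil => intro acc; simp [pvGoA, pvRuns]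
  | cons c rest ih =>
    intro acc
    cases rest with
    | nil => simp [pvGoA, pvRuns]
    | cons d rest' =>
      obtain ⟨r, rs, hr⟩ := pvRuns_shape d rest'
      have hcr : pvRuns (c :: d :: rest')
          = if pvWild c == pvWild d then (c :: d :: r) :: rs
            else [c] :: (d :: r) :: rs := by
        show (List.foldr _ [] (c :: d :: rest')) = _
        rw [List.foldr_cons]
        have : List.foldr _ [] (d :: rest') = pvRuns (d :: rest') := rfl
        rw [this, hr]
      by_cases hw : (pvWild c == pvWild d) = true
      · have hx : ((pvWild c && !pvWild d) || (!pvWild c && pvWild d)) = false := by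
          revert hw; cases pvWild c <;> cases pvWild d <;> simp
        rw [hcr, if_pos hw]
        simp only [pvGoA, hx, Bool.false_eq_true, if_false]
        rw [ih (acc ++ [c]), hr]
        simp
      · have hx : ((pvWild c && !pvWild d) || (!pvWild c && pvWild d)) = true := by
          revert hw; cases pvWild c <;> cases pvWild d <;> simp
        rw [hcr, if_neg hw]
        simp only [pvGoA, hx, if_true]
        rw [ih [], hr]
        simp

lemma split_key_eq_alt (b : String) : split_key b = split_key_alt b := by
  unfold split_key split_key_alt
  rw [pvGoA_eq_foldl b.toList [] []]
  simp only [List.nil_append]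
  rw [pvGoA_eq_runs]
  cases h : pvRuns b.toList <;> simp

-- ===== VERDICT (by name: the statement is the Claim_ definition above) =====
theorem split_key_spec : Claim_equal_split_key := by
  intro b _
  unfold Spec_split_key
  exact split_key_eq_alt b
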